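-- pv_equiv track=rewrite | github.com/PennyQ/dataspot | dataspot/network/hierarchy/hierarchy_helper.py | list_x_levels
-- ===== SOURCE A (Python) =====
-- def list_x_levels(levels, y_levels):
--     x_levels = dict()
--     for level in levels:
--         x_levels[level] = list()
--
--     for level in x_levels:
--         for node, y_level in y_levels.items():
--             if y_level == level:
--                 x_levels[level].append(node)
--
--     return x_levels
-- ===== SOURCE B (Python) =====
-- def list_x_levels(levels, y_levels):
--     groups = {}
--     for node, y_level in y_levels.items():
--         groups.setdefault(y_level, []).append(node)
--     return {level: groups.get(level, []) for level in dict.fromkeys(levels)}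
-- ===== Notes on version B (the rewrite author's own statement) =====
-- stated objective: faster
-- what changed: Instead of rescanning all of y_levels once per distinct level (A's nested loops), B groups y_levels once by y_level with setdefault and then builds the result as a comprehension over the deduplicated levels, looking each level up in the grouping.
import Mathlib
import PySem

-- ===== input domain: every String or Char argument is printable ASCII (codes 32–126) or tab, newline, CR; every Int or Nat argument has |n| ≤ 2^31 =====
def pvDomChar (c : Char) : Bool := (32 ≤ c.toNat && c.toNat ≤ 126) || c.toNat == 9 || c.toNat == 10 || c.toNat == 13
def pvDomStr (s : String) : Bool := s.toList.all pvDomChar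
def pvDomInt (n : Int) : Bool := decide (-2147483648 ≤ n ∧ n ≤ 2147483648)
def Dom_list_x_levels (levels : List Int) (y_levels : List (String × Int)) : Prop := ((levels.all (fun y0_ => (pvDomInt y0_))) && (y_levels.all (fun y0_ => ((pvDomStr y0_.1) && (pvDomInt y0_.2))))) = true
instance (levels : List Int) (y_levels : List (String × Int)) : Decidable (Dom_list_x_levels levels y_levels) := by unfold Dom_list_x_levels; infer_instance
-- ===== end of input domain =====

-- B replaces A's per-level rescans of y_levels (O(L*N)) with one grouping pass over y_levels
-- followed by a lookup per distinct level (O(L+N)); objective: faster.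

-- ===== PORT A =====
-- A: build an empty bucket per level, then FOR EACH key rescan all of y_levels.
def list_x_levels (levels : List Int) (y_levels : List (String × Int)) : List (Int × List String) :=
  let x0 : PySem.Dict Int (List String) :=
    levels.foldl (fun d level => d.insert level ([] : List String)) PySem.Dict.empty
  let x1 :=
    x0.keys.foldl (fun d level =>
      y_levels.foldl (fun d p =>
        if p.2 == level then d.modify level ([] : List String) (fun xs => xs ++ [p.1]) else d) d) x0
  x1.items

-- ===== PORT B =====
-- B: group y_levels once by y_level (setdefault-append), then a comprehension over the
-- deduplicated levels (dict.fromkeys) looks each level up in the grouping.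
def list_x_levels_alt (levels : List Int) (y_levels : List (String × Int)) : List (Int × List String) :=
  let groups : PySem.Dict Int (List String) :=
    y_levels.foldl (fun g p => g.modify p.2 ([] : List String) (fun xs => xs ++ [p.1]))
      PySem.Dict.empty
  (PySem.List.dedup levels).map (fun level => (level, groups.getD level ([] : List String)))

-- ===== PRECONDITION & SPEC =====
def Spec_list_x_levels (levels : List Int) (y_levels : List (String × Int)) (out : List (Int × List String)) : Prop := out = list_x_levels_alt levels y_levels
instance (levels : List Int) (y_levels : List (String × Int)) (out : List (Int × List String)) : Decidable (Spec_list_x_levels levels y_levels out) := by unfold Spec_list_x_levels; infer_instance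

-- ===== CLAIM (what is proved, stated in full; the proofs are below) =====
def Claim_equal_list_x_levels : Prop := ∀ (levels : List Int) (y_levels : List (String × Int)), Dom_list_x_levels levels y_levels → Spec_list_x_levels levels y_levels (list_x_levels levels y_levels)

-- ===== LEMMAS AND PROOFS =====

-- the nodes going into bucket k
def pvBucket (y_levels : List (String × Int)) (k : Int) : List String :=
  (y_levels.filter (fun p => p.2 == k)).map (·.1)

-- A's initial dict: one empty bucket per distinct level
def pvInit (levels : List Int) : PySem.Dict Int (List String) :=
  levels.foldl (fun d level => d.insert level ([] : List String)) PySem.Dict.empty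

lemma pvInit_getD (levels : List Int) (k : Int) :
    (pvInit levels).getD k ([] : List String) = [] := by
  unfold pvInit
  suffices h : ∀ d : PySem.Dict Int (List String), (∀ j, d.getD j ([] : List String) = []) →
      (levels.foldl (fun d level => d.insert level ([] : List String)) d).getD k ([] : List String) = [] by
    exact h _ (fun j => PySem.Dict.getD_empty j ([] : List String))
  induction levels with
  | nil => intro d hd; exact hd k
  | cons l ls ih =>
      intro d hd
      simp only [List.foldl_cons]
      refine ih _ (fun j => ?_)
      rw [PySem.Dict.getD_insert]
      split_ifs <;> simp [hd j]

lemma pvInit_keys (levels : List Int) : (pvInit levels).keys = PySem.Set.ofList levels := by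
  unfold pvInit
  rw [PySem.Dict.keys_foldl_insert]
  simp [PySem.Dict.keys_empty, PySem.Set.update_nil_left]

lemma pvInit_nodup (levels : List Int) : (pvInit levels).keys.Nodup := by
  rw [pvInit_keys]; exact PySem.Set.nodup_ofList levels

-- A's inner loop: one rescan of y_levels only changes bucket `level`, appending pvBucket
lemma pvA_inner_keys (y_levels : List (String × Int)) (level : Int)
    (d : PySem.Dict Int (List String)) (hlv : d.contains level = true) :
    (y_levels.foldl (fun d p =>
        if p.2 == level then d.modify level ([] : List String) (fun xs => xs ++ [p.1]) else d) d).keys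
      = d.keys := by
  induction y_levels generalizing d with
  | nil => rfl
  | cons p ps ih =>
      simp only [List.foldl_cons]
      by_cases hp : (p.2 == level) = true
      · rw [if_pos hp]
        have hkeys : (d.modify level ([] : List String) (fun xs => xs ++ [p.1])).keys = d.keys := by
          rw [PySem.Dict.keys_modify, PySem.Dict.keys_insert_of_contains _ _ hlv]
        have hc : (d.modify level ([] : List String) (fun xs => xs ++ [p.1])).contains level = true := by
          simp [PySem.Dict.contains_modify]
        rw [ih _ hc, hkeys]
      · rw [if_neg hp]
        exact ih d hlv

lemma pvA_inner_getD (y_levels : List (String × Int)) (level k : Int)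
    (d : PySem.Dict Int (List String)) :
    (y_levels.foldl (fun d p =>
        if p.2 == level then d.modify level ([] : List String) (fun xs => xs ++ [p.1]) else d) d).getD k ([] : List String)
      = if k = level then d.getD k ([] : List String) ++ pvBucket y_levels level
        else d.getD k ([] : List String) := by
  induction y_levels generalizing d with
  | nil => simp [pvBucket]
  | cons p ps ih =>
      simp only [List.foldl_cons]
      by_cases hp : (p.2 == level) = true
      · rw [if_pos hp, ih, PySem.Dict.getD_modify]
        have hp' : p.2 = level := by simpa using hp
        by_cases hk : k = level
        · subst hk
          simp [pvBucket, hp']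
        · simp [hk]
      · rw [if_neg hp, ih]
        have hp' : ¬ p.2 = level := by simpa using hp
        simp [pvBucket, hp']

-- A's outer loop over the distinct keys
lemma pvA_outer_keys (y_levels : List (String × Int)) (ks : List Int)
    (d : PySem.Dict Int (List String)) (h : ∀ l ∈ ks, d.contains l = true) :
    (ks.foldl (fun d level =>
        y_levels.foldl (fun d p =>
          if p.2 == level then d.modify level ([] : List String) (fun xs => xs ++ [p.1]) else d) d) d).keys
      = d.keys := by
  induction ks generalizing d with
  | nil => rfl
  | cons l ls ih =>
      simp only [List.foldl_cons]
      have hkeys := pvA_inner_keys y_levels l d (h l (List.mem_cons_self ..))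
      have h' : ∀ l' ∈ ls, (y_levels.foldl (fun d p =>
          if p.2 == l then d.modify l ([] : List String) (fun xs => xs ++ [p.1]) else d) d).contains l' = true := by
        intro l' hl'
        rw [PySem.Dict.contains_iff_mem_keys, hkeys, ← PySem.Dict.contains_iff_mem_keys]
        exact h l' (List.mem_cons_of_mem _ hl')
      rw [ih _ h', hkeys]

lemma pvA_outer_getD (y_levels : List (String × Int)) (ks : List Int) (k : Int)
    (hnd : ks.Nodup) (d : PySem.Dict Int (List String)) :
    (ks.foldl (fun d level =>
        y_levels.foldl (fun d p =>
          if p.2 == level then d.modify level ([] : List String) (fun xs => xs ++ [p.1]) else d) d) d).getD k ([] : List String)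
      = d.getD k ([] : List String) ++ (if k ∈ ks then pvBucket y_levels k else []) := by
  induction ks generalizing d with
  | nil => simp
  | cons l ls ih =>
      simp only [List.foldl_cons]
      rcases List.nodup_cons.mp hnd with ⟨hl, hnd'⟩
      rw [ih hnd', pvA_inner_getD]
      by_cases hk : k = l
      · subst hk
        simp [hl]
      · simp [hk, List.mem_cons]

-- B's grouping pass: bucket k of the fold is the accumulator's plus pvBucket
lemma pvB_groups_getD (y_levels : List (String × Int)) (k : Int)
    (d : PySem.Dict Int (List String)) :
    (y_levels.foldl (fun g p => g.modify p.2 ([] : List String) (fun xs => xs ++ [p.1])) d).getD k ([] : List String)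
      = d.getD k ([] : List String) ++ pvBucket y_levels k := by
  induction y_levels generalizing d with
  | nil => simp [pvBucket]
  | cons p ps ih =>
      simp only [List.foldl_cons]
      rw [ih, PySem.Dict.getD_modify]
      by_cases hk : k = p.2
      · subst hk
        simp [pvBucket]
      · have hk' : ¬ p.2 = k := fun h => hk h.symm
        simp [hk, pvBucket, hk']

-- ===== VERDICT (by name: the statement is the Claim_ definition above) =====
theorem list_x_levels_spec : Claim_equal_list_x_levels := by
  intro levels y_levels _
  unfold Spec_list_x_levels list_x_levels list_x_levels_alt
  simp only []
  set x0 : PySem.Dict Int (List String) :=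
    levels.foldl (fun d level => d.insert level ([] : List String)) PySem.Dict.empty with hx0
  have hx0i : x0 = pvInit levels := rfl
  have hnd : x0.keys.Nodup := by rw [hx0i]; exact pvInit_nodup levels
  set dA := x0.keys.foldl (fun d level =>
      y_levels.foldl (fun d p =>
        if p.2 == level then d.modify level ([] : List String) (fun xs => xs ++ [p.1]) else d) d) x0 with hdA
  have hAk : dA.keys = x0.keys := by
    rw [hdA]
    exact pvA_outer_keys y_levels x0.keys x0 (fun l hl => (PySem.Dict.contains_iff_mem_keys x0 l).mpr hl)
  rw [PySem.Dict.items_eq_map_keys dA (by rw [hAk]; exact hnd) ([] : List String), hAk,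
      hx0i, pvInit_keys, PySem.List.dedup_eq_ofList]
  refine List.map_congr_left (fun k hk => ?_)
  have hg : x0.getD k ([] : List String) = [] := hx0i ▸ pvInit_getD levels k
  have hA : dA.getD k ([] : List String) = pvBucket y_levels k := by
    rw [hdA, pvA_outer_getD y_levels x0.keys k hnd x0]
    have hk' : k ∈ x0.keys := by rw [hx0i, pvInit_keys]; exact hk
    simp [hk', hg]
  have hB : (y_levels.foldl (fun g p => g.modify p.2 ([] : List String) (fun xs => xs ++ [p.1]))
      PySem.Dict.empty).getD k ([] : List String) = pvBucket y_levels k := by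
    rw [pvB_groups_getD]
    simp [PySem.Dict.getD_empty]
  rw [hA, hB]
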